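-- pv_equiv track=rewrite | github.com/Yangjunyeong/algorithm_practice | 12392 . 배열2_특별한정렬_확인용.py | sortsearch
-- ===== SOURCE A (Python) =====
-- def sortsearch(a, m):
--     for i in range(m):
--         maxidx = i
--         minidx = i
--         if i % 2 == 0:
--
--             for j in range(i + 1, m):
--                 if a[maxidx] < a[j]:
--                     maxidx = j
--             a[i], a[maxidx] = a[maxidx], a[i]
--
--         else:
--
--             for j in range(i + 1, m):
--                 if a[minidx] > a[j]:
--                     minidx = j
--             a[i], a[minidx] = a[minidx], a[i]
--
--     return a
-- ===== SOURCE B (Python) =====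
-- def sortsearch(a, m):
--     # sort the first m elements once, then fill positions alternately
--     # from the high and low ends with two pointers (mutates a like the original)
--     s = sorted(a[i] for i in range(m))
--     out = []
--     lo, hi = 0, len(s) - 1
--     while lo <= hi:
--         out.append(s[hi])
--         if lo < hi:
--             out.append(s[lo])
--         lo += 1
--         hi -= 1
--     a[:len(s)] = out
--     return a
-- ===== Notes on version B (the rewrite author's own statement) =====
-- stated objective: faster
-- what changed: Replaces the quadratic alternating max/min selection sort (inner scan per position) by sorting the first m elements once and filling the output alternately from the high and low ends with two pointers.
import Mathlib
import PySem

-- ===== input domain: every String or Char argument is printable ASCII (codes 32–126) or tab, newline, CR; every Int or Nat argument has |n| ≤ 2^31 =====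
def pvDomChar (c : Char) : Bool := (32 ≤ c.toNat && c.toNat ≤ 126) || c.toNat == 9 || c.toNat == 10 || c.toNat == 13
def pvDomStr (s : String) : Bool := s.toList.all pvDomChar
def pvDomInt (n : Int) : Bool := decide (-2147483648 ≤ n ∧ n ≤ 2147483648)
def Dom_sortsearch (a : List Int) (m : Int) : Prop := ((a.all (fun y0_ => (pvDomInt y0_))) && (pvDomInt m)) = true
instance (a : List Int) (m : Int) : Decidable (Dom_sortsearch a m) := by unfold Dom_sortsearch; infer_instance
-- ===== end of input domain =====

-- B sorts the first m elements once and fills alternately from the two ends (two pointers)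
-- instead of A's quadratic alternating max/min selection sort; both mutate `a` in Python,
-- the equivalence proved here is about the return value.


-- ===== PORT A =====
-- body of A's outer `for i in range(m)` loop (acc = the list being sorted in place)
def stepA (m : Int) (acc : List Int) (i : Int) : List Int :=
  let maxidx : Int := i
  let minidx : Int := i
  if PySem.Int.mod i 2 == 0 then
    let maxidx := (PySem.List.pyRange (i + 1) m 1).foldl
      (fun mi j => if PySem.List.pyGetD acc mi 0 < PySem.List.pyGetD acc j 0 then j else mi)
      maxidx
    PySem.List.pySetD (PySem.List.pySetD acc i (PySem.List.pyGetD acc maxidx 0)) maxidx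
      (PySem.List.pyGetD acc i 0)
  else
    let minidx := (PySem.List.pyRange (i + 1) m 1).foldl
      (fun mi j => if PySem.List.pyGetD acc mi 0 > PySem.List.pyGetD acc j 0 then j else mi)
      minidx
    PySem.List.pySetD (PySem.List.pySetD acc i (PySem.List.pyGetD acc minidx 0)) minidx
      (PySem.List.pyGetD acc i 0)

def sortsearch (a : List Int) (m : Int) : List Int :=
  (PySem.List.pyRange 0 m 1).foldl (stepA m) a

-- ===== PORT B =====
-- the `while lo <= hi` two-pointer loop of Source B
def fillTwoPointers (s : List Int) (lo hi : Int) : List Int :=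
  if lo ≤ hi then
    PySem.List.pyGetD s hi 0 ::
      ((if lo < hi then [PySem.List.pyGetD s lo 0] else []) ++ fillTwoPointers s (lo + 1) (hi - 1))
  else []
termination_by (hi + 1 - lo).toNat
decreasing_by omega

def sortsearch_alt (a : List Int) (m : Int) : List Int :=
  let s := PySem.List.sorted ((PySem.List.pyRange 0 m 1).map (fun i => PySem.List.pyGetD a i 0))
    (fun x => x) false
  let out := fillTwoPointers s 0 ((s.length : Int) - 1)
  out ++ a.drop s.length

-- ===== PRECONDITION & SPEC =====
-- Pre_ excludes exactly the inputs with m > len(a), where both Pythons raise IndexError.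
def Pre_sortsearch (a : List Int) (m : Int) : Prop := m ≤ (a.length : Int)
instance (a : List Int) (m : Int) : Decidable (Pre_sortsearch a m) := by
  unfold Pre_sortsearch; infer_instance

def pvWitness_sortsearch : List Int × Int := ([3, 1, 2, 2], 3)

def Spec_sortsearch (a : List Int) (m : Int) (out : List Int) : Prop := out = sortsearch_alt a m
instance (a : List Int) (m : Int) (out : List Int) : Decidable (Spec_sortsearch a m out) := by
  unfold Spec_sortsearch; infer_instance

-- ===== CLAIM (what is proved, stated in full; the proofs are below) =====
def Claim_equal_sortsearch : Prop := ∀ (a : List Int) (m : Int), Dom_sortsearch a m →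
  Pre_sortsearch a m → Spec_sortsearch a m (sortsearch a m)

-- ===== LEMMAS AND PROOFS =====

-- alternating extremum selection: the value sequence both programs produce (fuel = length)
def altSelF : Nat → List Int → Bool → List Int
  | _, [], _ => []
  | 0, _ :: _, _ => []
  | n + 1, x :: t, p =>
    let v := if p then t.foldl max x else t.foldl min x
    v :: altSelF n ((x :: t).erase v) (!p)

def altSel (l : List Int) (p : Bool) : List Int := altSelF l.length l p

theorem extremum_mem (t : List Int) (x : Int) (p : Bool) :
    (if p then t.foldl max x else t.foldl min x) ∈ x :: t := by
  by_cases hp : p <;> simp only [hp, if_true, Bool.false_eq_true, if_false]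
  · rcases PySem.List.foldl_max_mem t x with h | h <;> simp [h]
  · rcases PySem.List.foldl_min_mem t x with h | h <;> simp [h]

theorem altSel_cons (x : Int) (t : List Int) (p : Bool) :
    altSel (x :: t) p =
      (if p then t.foldl max x else t.foldl min x) ::
        altSel ((x :: t).erase (if p then t.foldl max x else t.foldl min x)) (!p) := by
  have hm := extremum_mem t x p
  have hlen := List.length_erase_of_mem hm
  simp only [altSel, List.length_cons] at *
  rw [hlen, altSelF]
  rfl

theorem foldl_max_eq_of_perm (x y : Int) (t u : List Int) (h : (x :: t).Perm (y :: u)) :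
    t.foldl max x = u.foldl max y := by
  have h1 := PySem.List.le_foldl_max t x
  have h2 := PySem.List.le_foldl_max u y
  have m1 : t.foldl max x ∈ x :: t := by
    rcases PySem.List.foldl_max_mem t x with h' | h' <;> simp [h']
  have m2 : u.foldl max y ∈ y :: u := by
    rcases PySem.List.foldl_max_mem u y with h' | h' <;> simp [h']
  have ub1 : ∀ z ∈ x :: t, z ≤ t.foldl max x := by
    intro z hz; rcases List.mem_cons.1 hz with rfl | hz; exacts [h1.1, h1.2 z hz]
  have ub2 : ∀ z ∈ y :: u, z ≤ u.foldl max y := by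
    intro z hz; rcases List.mem_cons.1 hz with rfl | hz; exacts [h2.1, h2.2 z hz]
  exact le_antisymm (ub2 _ (h.mem_iff.1 m1)) (ub1 _ (h.mem_iff.2 m2))

theorem foldl_min_eq_of_perm (x y : Int) (t u : List Int) (h : (x :: t).Perm (y :: u)) :
    t.foldl min x = u.foldl min y := by
  have h1 := PySem.List.foldl_min_le t x
  have h2 := PySem.List.foldl_min_le u y
  have m1 : t.foldl min x ∈ x :: t := by
    rcases PySem.List.foldl_min_mem t x with h' | h' <;> simp [h']
  have m2 : u.foldl min y ∈ y :: u := by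
    rcases PySem.List.foldl_min_mem u y with h' | h' <;> simp [h']
  have lb1 : ∀ z ∈ x :: t, t.foldl min x ≤ z := by
    intro z hz; rcases List.mem_cons.1 hz with rfl | hz; exacts [h1.1, h1.2 z hz]
  have lb2 : ∀ z ∈ y :: u, u.foldl min y ≤ z := by
    intro z hz; rcases List.mem_cons.1 hz with rfl | hz; exacts [h2.1, h2.2 z hz]
  exact le_antisymm (lb1 _ (h.mem_iff.2 m2)) (lb2 _ (h.mem_iff.1 m1))

theorem altSel_perm : ∀ (n : Nat) (l₁ l₂ : List Int) (p : Bool), l₁.length ≤ n →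
    l₁.Perm l₂ → altSel l₁ p = altSel l₂ p := by
  intro n
  induction n with
  | zero =>
    intro l₁ l₂ p h hp
    have h1 : l₁ = [] := List.length_eq_zero_iff.1 (Nat.le_zero.1 h)
    subst h1
    rw [hp.nil_eq]
  | succ n ih =>
    intro l₁ l₂ p h hp
    cases l₁ with
    | nil => rw [hp.nil_eq]
    | cons x t =>
      cases l₂ with
      | nil => exact absurd hp.length_eq (by simp)
      | cons y u =>
        rw [altSel_cons, altSel_cons]
        have hv : (if p then t.foldl max x else t.foldl min x)
            = (if p then u.foldl max y else u.foldl min y) := by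
          by_cases hp' : p <;> simp only [hp', if_true, Bool.false_eq_true, if_false]
          · exact foldl_max_eq_of_perm x y t u hp
          · exact foldl_min_eq_of_perm x y t u hp
        rw [hv]
        congr 1
        have hmem := extremum_mem t x p
        rw [hv] at hmem
        refine ih _ _ _ ?_ (hp.erase _)
        rw [List.length_erase_of_mem hmem]
        simp only [List.length_cons] at h ⊢
        omega

theorem tail_take_eq (l : List Int) (n : Nat) : (l.take n).tail = l.tail.take (n - 1) := by
  cases l with
  | nil => simp
  | cons a l' => cases n with
    | zero => simp
    | succ n => simp

theorem dropLast_take_eq (l : List Int) (k : Nat) (h : k ≤ l.length) :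
    (l.take k).dropLast = l.take (k - 1) := by
  rcases Nat.lt_or_ge k l.length with h' | h'
  · exact List.dropLast_take h'
  · have hk : k = l.length := le_antisymm h h'
    subst hk
    rw [List.take_length, List.dropLast_eq_take]

theorem sorted_foldl_max_getLast (x : Int) (t : List Int)
    (hw : (x :: t).Pairwise (· ≤ ·)) :
    t.foldl max x = (x :: t).getLast (by simp) := by
  have h1 := PySem.List.le_foldl_max t x
  have hmem : t.foldl max x ∈ x :: t := by
    rcases PySem.List.foldl_max_mem t x with h' | h' <;> simp [h']
  have hgl : (x :: t).getLast (by simp) ∈ x :: t := List.getLast_mem _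
  have hub : ∀ z ∈ x :: t, z ≤ (x :: t).getLast (by simp) := by
    intro z hz
    rcases List.mem_iff_getElem.1 hz with ⟨i, hi, rfl⟩
    rw [List.getLast_eq_getElem]
    rcases Nat.lt_or_ge i ((x :: t).length - 1) with h' | h'
    · exact List.pairwise_iff_getElem.1 hw i _ hi (by simp only [List.length_cons]; omega) h'
    · have : i = (x :: t).length - 1 := by simp only [List.length_cons] at hi h' ⊢; omega
      subst this; exact le_refl _
  have hub2 : ∀ z ∈ x :: t, z ≤ t.foldl max x := by
    intro z hz; rcases List.mem_cons.1 hz with rfl | hz; exacts [h1.1, h1.2 z hz]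
  exact le_antisymm (hub _ hmem) (hub2 _ hgl)

theorem sorted_foldl_min_head (x : Int) (t : List Int)
    (hw : (x :: t).Pairwise (· ≤ ·)) :
    t.foldl min x = x := by
  have h1 := PySem.List.foldl_min_le t x
  have hx : ∀ z ∈ t, x ≤ z := (List.pairwise_cons.1 hw).1
  rcases PySem.List.foldl_min_mem t x with h' | h'
  · exact h'
  · exact le_antisymm h1.1 (hx _ h')

theorem altSel_sorted_max (w : List Int) (hw : w.Pairwise (· ≤ ·)) (hne : w ≠ []) :
    altSel w true = w.getLast hne :: altSel w.dropLast false := by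
  cases w with
  | nil => exact absurd rfl hne
  | cons x t =>
    rw [altSel_cons]
    simp only [if_true]
    rw [sorted_foldl_max_getLast x t hw]
    congr 1
    have hperm : ((x :: t).erase ((x :: t).getLast (by simp))).Perm (x :: t).dropLast := by
      have h1 : (x :: t).Perm (((x :: t).getLast (by simp)) :: (x :: t).erase ((x :: t).getLast (by simp))) :=
        List.perm_cons_erase (List.getLast_mem _)
      have h2 : (x :: t).Perm (((x :: t).getLast (by simp)) :: (x :: t).dropLast) := by
        conv_lhs => rw [← List.dropLast_concat_getLast (l := x :: t) (by simp)]
        exact List.perm_append_singleton _ _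
      exact (h1.symm.trans h2).cons_inv
    exact altSel_perm _ _ _ _ (le_refl _) hperm

theorem altSel_sorted_min (x : Int) (t : List Int) (hw : (x :: t).Pairwise (· ≤ ·)) :
    altSel (x :: t) false = x :: altSel t true := by
  rw [altSel_cons]
  simp only [Bool.false_eq_true, if_false]
  rw [sorted_foldl_min_head x t hw, List.erase_cons_head]
  rfl

theorem fillTP_spec : ∀ (n : Nat) (s : List Int) (lo hi : Int), s.Pairwise (· ≤ ·) →
    (hi + 1 - lo).toNat ≤ n → 0 ≤ lo → hi < (s.length : Int) →
    fillTwoPointers s lo hi = altSel ((s.drop lo.toNat).take (hi + 1 - lo).toNat) true := by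
  intro n
  induction n with
  | zero =>
    intro s lo hi _ hfuel _ _
    have hlt : ¬ lo ≤ hi := by omega
    rw [fillTwoPointers, if_neg hlt]
    have h0 : (hi + 1 - lo).toNat = 0 := by omega
    rw [h0]
    simp [altSel, altSelF]
  | succ n ih =>
    intro s lo hi hs hfuel hlo hhi
    by_cases hcmp : lo ≤ hi
    · have hhi0 : 0 ≤ hi := le_trans hlo hcmp
      have hk1 : 1 ≤ (hi + 1 - lo).toNat := by omega
      have hLk : lo.toNat + (hi + 1 - lo).toNat = hi.toNat + 1 := by omega
      have hsub : ((s.drop lo.toNat).take ((hi + 1 - lo).toNat)).Sublist s :=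
        (List.take_sublist _ _).trans (List.drop_sublist _ _)
      have hws : ((s.drop lo.toNat).take ((hi + 1 - lo).toNat)).Pairwise (· ≤ ·) :=
        hs.sublist hsub
      have hwlen : ((s.drop lo.toNat).take ((hi + 1 - lo).toNat)).length = (hi + 1 - lo).toNat := by
        simp only [List.length_take, List.length_drop]
        omega
      have hwne : (s.drop lo.toNat).take ((hi + 1 - lo).toNat) ≠ [] := by
        intro h; rw [h] at hwlen; simp at hwlen; omega
      rw [fillTwoPointers, if_pos hcmp]
      rw [altSel_sorted_max _ hws hwne]
      have hgl : ((s.drop lo.toNat).take ((hi + 1 - lo).toNat)).getLast hwne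
          = PySem.List.pyGetD s hi 0 := by
        rw [PySem.List.pyGetD_eq_getElem s 0 hhi0 hhi, List.getLast_eq_getElem]
        rw [List.getElem_take, List.getElem_drop]
        exact getElem_congr rfl (by omega) (by omega)
      rw [hgl]
      congr 1
      have hdl : ((s.drop lo.toNat).take ((hi + 1 - lo).toNat)).dropLast
          = (s.drop lo.toNat).take ((hi + 1 - lo).toNat - 1) := by
        apply dropLast_take_eq
        simp only [List.length_drop]
        omega
      rcases lt_or_eq_of_le hcmp with hlt | heq
      · -- lo < hi
        have hk2 : 2 ≤ (hi + 1 - lo).toNat := by omega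
        rw [if_pos hlt]
        have hne2 : (s.drop lo.toNat).take ((hi + 1 - lo).toNat - 1) ≠ [] := by
          intro h
          have := congrArg List.length h
          simp only [List.length_take, List.length_drop, List.length_nil] at this
          omega
        have hws2 : ((s.drop lo.toNat).take ((hi + 1 - lo).toNat - 1)).Pairwise (· ≤ ·) :=
          hs.sublist ((List.take_sublist _ _).trans (List.drop_sublist _ _))
        rw [hdl]
        rw [← List.cons_head_tail hne2]
        rw [altSel_sorted_min _ _ (by rw [List.cons_head_tail hne2]; exact hws2)]
        have hhd : ((s.drop lo.toNat).take ((hi + 1 - lo).toNat - 1)).head hne2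
            = PySem.List.pyGetD s lo 0 := by
          rw [PySem.List.pyGetD_eq_getElem s 0 hlo (by omega), List.head_eq_getElem]
          rw [List.getElem_take, List.getElem_drop]
          exact getElem_congr rfl (by omega) (by omega)
        have htl : ((s.drop lo.toNat).take ((hi + 1 - lo).toNat - 1)).tail
            = (s.drop ((lo + 1).toNat)).take ((hi - 1 + 1 - (lo + 1)).toNat) := by
          rw [tail_take_eq, List.tail_drop]
          have e1 : lo.toNat + 1 = (lo + 1).toNat := by omega
          have e2 : (hi + 1 - lo).toNat - 1 - 1 = (hi - 1 + 1 - (lo + 1)).toNat := by omega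
          rw [e1, e2]
        rw [hhd, htl]
        rw [ih s (lo + 1) (hi - 1) hs (by omega) (by omega) (by omega)]
        rfl
      · -- lo = hi
        subst heq
        rw [if_neg (lt_irrefl lo)]
        have hk : (lo + 1 - lo).toNat = 1 := by omega
        rw [hdl, hk]
        rw [fillTwoPointers, if_neg (by omega)]
        simp [altSel, altSelF]
    · have h0 : (hi + 1 - lo).toNat = 0 := by omega
      rw [fillTwoPointers, if_neg hcmp, h0]
      simp [altSel, altSelF]

-- ---------- A-side lemmas ----------

theorem argfold_max (a : List Int) : ∀ (R : List Int) (mi : Int),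
    (R.foldl (fun mi j => if PySem.List.pyGetD a mi 0 < PySem.List.pyGetD a j 0 then j else mi) mi
        = mi
      ∨ R.foldl (fun mi j => if PySem.List.pyGetD a mi 0 < PySem.List.pyGetD a j 0 then j else mi) mi
        ∈ R)
    ∧ PySem.List.pyGetD
        (a) (R.foldl (fun mi j => if PySem.List.pyGetD a mi 0 < PySem.List.pyGetD a j 0 then j else mi) mi) 0
      = (R.map (fun j => PySem.List.pyGetD a j 0)).foldl max (PySem.List.pyGetD a mi 0) := by
  intro R
  induction R with
  | nil => intro mi; exact ⟨Or.inl rfl, rfl⟩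
  | cons j R' ihR =>
    intro mi
    simp only [List.foldl_cons, List.map_cons]
    by_cases hc : PySem.List.pyGetD a mi 0 < PySem.List.pyGetD a j 0
    · rw [if_pos hc]
      rcases ihR j with ⟨hmem, hval⟩
      refine ⟨?_, ?_⟩
      · rcases hmem with h | h <;> simp [h]
      · rw [hval]
        congr 1
        omega
    · rw [if_neg hc]
      rcases ihR mi with ⟨hmem, hval⟩
      refine ⟨?_, ?_⟩
      · rcases hmem with h | h <;> simp [h]
      · rw [hval]
        congr 1
        omega

theorem argfold_min (a : List Int) : ∀ (R : List Int) (mi : Int),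
    (R.foldl (fun mi j => if PySem.List.pyGetD a mi 0 > PySem.List.pyGetD a j 0 then j else mi) mi
        = mi
      ∨ R.foldl (fun mi j => if PySem.List.pyGetD a mi 0 > PySem.List.pyGetD a j 0 then j else mi) mi
        ∈ R)
    ∧ PySem.List.pyGetD
        (a) (R.foldl (fun mi j => if PySem.List.pyGetD a mi 0 > PySem.List.pyGetD a j 0 then j else mi) mi) 0
      = (R.map (fun j => PySem.List.pyGetD a j 0)).foldl min (PySem.List.pyGetD a mi 0) := by
  intro R
  induction R with
  | nil => intro mi; exact ⟨Or.inl rfl, rfl⟩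
  | cons j R' ihR =>
    intro mi
    simp only [List.foldl_cons, List.map_cons]
    by_cases hc : PySem.List.pyGetD a mi 0 > PySem.List.pyGetD a j 0
    · rw [if_pos hc]
      rcases ihR j with ⟨hmem, hval⟩
      refine ⟨?_, ?_⟩
      · rcases hmem with h | h <;> simp [h]
      · rw [hval]
        congr 1
        omega
    · rw [if_neg hc]
      rcases ihR mi with ⟨hmem, hval⟩
      refine ⟨?_, ?_⟩
      · rcases hmem with h | h <;> simp [h]
      · rw [hval]
        congr 1
        omega

theorem seg_eq_map (a : List Int) (i m : Int) (h0 : 0 ≤ i) (him : i ≤ m)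
    (hm : m ≤ (a.length : Int)) :
    (PySem.List.pyRange i m 1).map (fun j => PySem.List.pyGetD a j 0)
      = (a.drop i.toNat).take (m - i).toNat := by
  have happ := PySem.List.pyRange_one_append i m (a.length : Int) him hm
  have hfull := PySem.List.map_pyGetD_pyRange' a 0 h0
  have hsplit : a.drop i.toNat
      = (PySem.List.pyRange i m 1).map (fun j => PySem.List.pyGetD a j 0)
        ++ (PySem.List.pyRange m (a.length : Int) 1).map (fun j => PySem.List.pyGetD a j 0) := by
    rw [← List.map_append, ← happ, hfull]
  rw [hsplit]
  have hlen : ((PySem.List.pyRange i m 1).map (fun j => PySem.List.pyGetD a j 0)).length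
      = (m - i).toNat := by
    rw [List.length_map, PySem.List.length_pyRange_one]
  rw [← hlen, List.take_left]

theorem set_take_succ (l : List Int) (j : Nat) (v : Int) (h : j < l.length) :
    (l.set j v).take (j + 1) = l.take j ++ [v] := by
  rw [List.set_eq_take_cons_drop v h, List.take_append]
  have h1 : (l.take j).length = j := by simp; omega
  rw [h1]
  simp

theorem set_perm_erase (t : List Int) (j : Nat) (x : Int) (h : j < t.length) :
    (t.set j x).Perm ((x :: t).erase t[j]) := by
  by_cases hx : x = t[j]
  · rw [← hx, List.erase_cons_head, hx, List.set_getElem_self]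
  · rw [List.erase_cons_tail (by simpa using hx)]
    have h1 : t.set j x = t.take j ++ x :: t.drop (j + 1) := List.set_eq_take_cons_drop x h
    have h2 : (t.take j ++ x :: t.drop (j + 1)).Perm (x :: (t.take j ++ t.drop (j + 1))) :=
      List.perm_middle
    have h3 : t.Perm (t[j] :: t.eraseIdx j) := (List.getElem_cons_eraseIdx_perm h).symm
    have h4 : t.eraseIdx j = t.take j ++ t.drop (j + 1) := List.eraseIdx_eq_take_drop_succ t j
    have h5 : t.Perm (t[j] :: t.erase t[j]) := List.perm_cons_erase (List.getElem_mem h)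
    have h6 : (t.take j ++ t.drop (j + 1)).Perm (t.erase t[j]) := by
      have := (h3.symm.trans h5)
      rw [h4] at this
      exact this.cons_inv
    rw [h1]
    exact h2.trans (h6.cons x)

theorem seg_cons (a : List Int) (i m : Int) (h0 : 0 ≤ i) (him : i < m)
    (hm : m ≤ (a.length : Int)) :
    (a.drop i.toNat).take (m - i).toNat
      = PySem.List.pyGetD a i 0 :: (a.drop (i.toNat + 1)).take (m - i - 1).toNat := by
  rw [← seg_eq_map a i m h0 (le_of_lt him) hm]
  rw [PySem.List.pyRange_one_cons him, List.map_cons]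
  congr 1
  have e1 : i.toNat + 1 = (i + 1).toNat := by omega
  have e2 : (m - i - 1).toNat = (m - (i + 1)).toNat := by omega
  rw [e1, e2, seg_eq_map a (i + 1) m (by omega) (by omega) hm]

theorem parity_succ (i : Int) : (PySem.Int.mod (i + 1) 2 == 0) = !(PySem.Int.mod i 2 == 0) := by
  rw [PySem.Int.mod_eq_emod_of_pos (by norm_num), PySem.Int.mod_eq_emod_of_pos (by norm_num)]
  rcases Int.emod_two_eq i with h | h
  · have h1 : (i + 1) % 2 = 1 := by omega
    rw [h, h1]; rfl
  · have h1 : (i + 1) % 2 = 0 := by omega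
    rw [h, h1]; rfl

theorem stepA_eq (a : List Int) (i m : Int) (_h0 : 0 ≤ i) (him : i < m)
    (_hm : m ≤ (a.length : Int)) :
    ∃ r : Int, i ≤ r ∧ r < m ∧
      stepA m a i
        = PySem.List.pySetD (PySem.List.pySetD a i (PySem.List.pyGetD a r 0)) r
            (PySem.List.pyGetD a i 0)
      ∧ PySem.List.pyGetD a r 0
        = (if PySem.Int.mod i 2 == 0
           then ((PySem.List.pyRange (i + 1) m 1).map (fun j => PySem.List.pyGetD a j 0)).foldl
             max (PySem.List.pyGetD a i 0)
           else ((PySem.List.pyRange (i + 1) m 1).map (fun j => PySem.List.pyGetD a j 0)).foldl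
             min (PySem.List.pyGetD a i 0)) := by
  unfold stepA
  by_cases hp : (PySem.Int.mod i 2 == 0) = true
  · simp only [hp, if_true]
    refine ⟨(PySem.List.pyRange (i + 1) m 1).foldl
      (fun mi j => if PySem.List.pyGetD a mi 0 < PySem.List.pyGetD a j 0 then j else mi) i,
      ?_, ?_, rfl, ?_⟩
    · rcases (argfold_max a (PySem.List.pyRange (i + 1) m 1) i).1 with h | h
      · omega
      · have := (PySem.List.mem_pyRange_one.1 h).1; omega
    · rcases (argfold_max a (PySem.List.pyRange (i + 1) m 1) i).1 with h | h
      · omega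
      · exact (PySem.List.mem_pyRange_one.1 h).2
    · exact (argfold_max a (PySem.List.pyRange (i + 1) m 1) i).2
  · rw [Bool.not_eq_true] at hp
    simp only [hp, Bool.false_eq_true, if_false]
    refine ⟨(PySem.List.pyRange (i + 1) m 1).foldl
      (fun mi j => if PySem.List.pyGetD a mi 0 > PySem.List.pyGetD a j 0 then j else mi) i,
      ?_, ?_, rfl, ?_⟩
    · rcases (argfold_min a (PySem.List.pyRange (i + 1) m 1) i).1 with h | h
      · omega
      · have := (PySem.List.mem_pyRange_one.1 h).1; omega
    · rcases (argfold_min a (PySem.List.pyRange (i + 1) m 1) i).1 with h | h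
      · omega
      · exact (PySem.List.mem_pyRange_one.1 h).2
    · exact (argfold_min a (PySem.List.pyRange (i + 1) m 1) i).2

theorem swap_decomp (a : List Int) (i r m : Int) (h0 : 0 ≤ i) (hir : i ≤ r) (hrm : r < m)
    (hm : m ≤ (a.length : Int)) :
    (PySem.List.pySetD (PySem.List.pySetD a i (PySem.List.pyGetD a r 0)) r
        (PySem.List.pyGetD a i 0)).length = a.length
    ∧ (PySem.List.pySetD (PySem.List.pySetD a i (PySem.List.pyGetD a r 0)) r
        (PySem.List.pyGetD a i 0)).take (i.toNat + 1)
      = a.take i.toNat ++ [PySem.List.pyGetD a r 0]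
    ∧ (PySem.List.pySetD (PySem.List.pySetD a i (PySem.List.pyGetD a r 0)) r
        (PySem.List.pyGetD a i 0)).drop m.toNat = a.drop m.toNat
    ∧ (((PySem.List.pySetD (PySem.List.pySetD a i (PySem.List.pyGetD a r 0)) r
        (PySem.List.pyGetD a i 0)).drop (i.toNat + 1)).take (m - i - 1).toNat).Perm
        (((a.drop i.toNat).take (m - i).toNat).erase (PySem.List.pyGetD a r 0)) := by
  have h0r : 0 ≤ r := le_trans h0 hir
  have hrlen : r < (a.length : Int) := lt_of_lt_of_le hrm hm
  have hilen : i < (a.length : Int) := lt_of_le_of_lt hir hrlen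
  have hgr : PySem.List.pyGetD a r 0 = a[r.toNat]'(by omega) :=
    PySem.List.pyGetD_eq_getElem a 0 h0r hrlen
  have hgi : PySem.List.pyGetD a i 0 = a[i.toNat]'(by omega) :=
    PySem.List.pyGetD_eq_getElem a 0 h0 hilen
  have hset : PySem.List.pySetD (PySem.List.pySetD a i (PySem.List.pyGetD a r 0)) r
      (PySem.List.pyGetD a i 0)
      = (a.set i.toNat (a[r.toNat]'(by omega))).set r.toNat (a[i.toNat]'(by omega)) := by
    rw [PySem.List.pySetD_of_nonneg _ _ h0, PySem.List.pySetD_of_nonneg _ _ h0r, hgr, hgi]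
  rw [hset, hgr]
  rcases eq_or_lt_of_le hir with rfl | hilt
  · -- r = i : the swap is a no-op
    have hid : (a.set i.toNat (a[i.toNat]'(by omega))).set i.toNat (a[i.toNat]'(by omega)) = a := by
      rw [List.set_set, List.set_getElem_self]
    rw [hid]
    refine ⟨rfl, List.take_succ_eq_append_getElem (by omega), rfl, ?_⟩
    have hseg := seg_cons a i m h0 (lt_of_le_of_lt hir hrm) hm
    rw [hgi] at hseg
    rw [hseg, List.erase_cons_head]
  · -- i < r
    have hIR : i.toNat + 1 ≤ r.toNat := by omega
    refine ⟨by simp, ?_, ?_, ?_⟩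
    · rw [List.take_set_of_le (by omega), set_take_succ a i.toNat _ (by omega)]
    · rw [List.drop_set_of_lt (by omega), List.drop_set_of_lt (by omega)]
    · -- the permutation
      have hd1 : ((a.set i.toNat (a[r.toNat]'(by omega))).set r.toNat
            (a[i.toNat]'(by omega))).drop (i.toNat + 1)
          = (a.drop (i.toNat + 1)).set (r.toNat - (i.toNat + 1)) (a[i.toNat]'(by omega)) := by
        rw [List.drop_set, if_neg (by omega), List.drop_set_of_lt (by omega)]
      rw [hd1, List.take_set]
      have hjlt : r.toNat - (i.toNat + 1) < ((a.drop (i.toNat + 1)).take (m - i - 1).toNat).length := by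
        simp only [List.length_take, List.length_drop]
        omega
      have htj : ((a.drop (i.toNat + 1)).take (m - i - 1).toNat)[r.toNat - (i.toNat + 1)]'hjlt
          = a[r.toNat]'(by omega) := by
        rw [List.getElem_take, List.getElem_drop]
        exact getElem_congr rfl (by omega) (by omega)
      have hperm := set_perm_erase ((a.drop (i.toNat + 1)).take (m - i - 1).toNat)
        (r.toNat - (i.toNat + 1)) (a[i.toNat]'(by omega)) hjlt
      rw [htj] at hperm
      have hseg := seg_cons a i m h0 (lt_trans hilt hrm) hm
      rw [hgi] at hseg
      rw [hseg]
      exact hperm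

theorem loopA : ∀ (n : Nat) (a : List Int) (i m : Int), (m - i).toNat ≤ n → 0 ≤ i → i ≤ m →
    m ≤ (a.length : Int) →
    (PySem.List.pyRange i m 1).foldl (stepA m) a
      = a.take i.toNat
        ++ altSel ((a.drop i.toNat).take (m - i).toNat) (PySem.Int.mod i 2 == 0)
        ++ a.drop m.toNat := by
  intro n
  induction n with
  | zero =>
    intro a i m hf h0 him hm
    have heq : i = m := by omega
    subst heq
    rw [PySem.List.pyRange_one_eq_nil (le_refl i)]
    simp [altSel, altSelF]
  | succ n ih =>
    intro a i m hf h0 him hm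
    rcases eq_or_lt_of_le him with rfl | hlt
    · rw [PySem.List.pyRange_one_eq_nil (le_refl i)]
      simp [altSel, altSelF]
    · rw [PySem.List.pyRange_one_cons hlt, List.foldl_cons]
      obtain ⟨r, hir, hrm, hstep, hval⟩ := stepA_eq a i m h0 hlt hm
      rw [hstep]
      obtain ⟨s1, s2, s3, s4⟩ := swap_decomp a i r m h0 hir hrm hm
      rw [ih _ (i + 1) m (by omega) (by omega) (by omega) (by rw [s1]; exact hm)]
      have e2 : (m - (i + 1)).toNat = (m - i - 1).toNat := by omega
      have e1 : (i + 1).toNat = i.toNat + 1 := by omega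
      rw [e2, e1, s2, s3]
      rw [altSel_perm _ _ _ _ (le_refl _) s4]
      rw [parity_succ]
      have hsegmap : (a.drop i.toNat).take (m - i).toNat
          = PySem.List.pyGetD a i 0
            :: (PySem.List.pyRange (i + 1) m 1).map (fun j => PySem.List.pyGetD a j 0) := by
        rw [← seg_eq_map a i m h0 (le_of_lt hlt) hm, PySem.List.pyRange_one_cons hlt,
          List.map_cons]
      rw [hsegmap, altSel_cons, ← hval]
      simp only [List.append_assoc, List.cons_append, List.nil_append]

-- ===== VERDICT (by name: the statement is the Claim_ definition above) =====
theorem sortsearch_spec : Claim_equal_sortsearch := by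
  intro a m _ hpre
  unfold Spec_sortsearch sortsearch sortsearch_alt
  unfold Pre_sortsearch at hpre
  by_cases hm0 : 0 ≤ m
  · rw [loopA m.toNat a 0 m (by omega) (le_refl 0) hm0 hpre]
    have hpar : (PySem.Int.mod (0 : Int) 2 == 0) = true := by decide
    rw [hpar]
    have hslen : (PySem.List.sorted ((PySem.List.pyRange 0 m 1).map
        (fun i => PySem.List.pyGetD a i 0)) (fun x => x) false).length = m.toNat := by
      rw [PySem.List.length_sorted, List.length_map, PySem.List.length_pyRange_one]
      omega
    have hsorted : (PySem.List.sorted ((PySem.List.pyRange 0 m 1).map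
        (fun i => PySem.List.pyGetD a i 0)) (fun x => x) false).Pairwise (· ≤ ·) := by
      simpa using PySem.List.sorted_pairwise ((PySem.List.pyRange 0 m 1).map
        (fun i => PySem.List.pyGetD a i 0)) (fun x => x)
    have hfill := fillTP_spec (PySem.List.sorted ((PySem.List.pyRange 0 m 1).map
        (fun i => PySem.List.pyGetD a i 0)) (fun x => x) false).length
      (PySem.List.sorted ((PySem.List.pyRange 0 m 1).map
        (fun i => PySem.List.pyGetD a i 0)) (fun x => x) false)
      0 (((PySem.List.sorted ((PySem.List.pyRange 0 m 1).map
        (fun i => PySem.List.pyGetD a i 0)) (fun x => x) false).length : Int) - 1)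
      hsorted (by omega) (le_refl 0) (by omega)
    simp only [hfill]
    have hwin : ((((PySem.List.sorted ((PySem.List.pyRange 0 m 1).map
        (fun i => PySem.List.pyGetD a i 0)) (fun x => x) false).length : Int) - 1 + 1
          - 0).toNat) = (PySem.List.sorted ((PySem.List.pyRange 0 m 1).map
        (fun i => PySem.List.pyGetD a i 0)) (fun x => x) false).length := by omega
    rw [hwin]
    simp only [Int.toNat_zero, List.drop_zero, List.take_length]
    have hperm : (PySem.List.sorted ((PySem.List.pyRange 0 m 1).map
        (fun i => PySem.List.pyGetD a i 0)) (fun x => x) false).Perm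
        ((a.drop 0).take (m - 0).toNat) := by
      refine (PySem.List.sorted_perm _ _ _).trans ?_
      rw [seg_eq_map a 0 m (le_refl 0) hm0 hpre]
      exact List.Perm.refl _
    rw [altSel_perm _ _ _ true (le_refl _) hperm]
    rw [hslen]
    simp only [List.drop_zero, List.take_zero, List.nil_append, Int.sub_zero]
  · rw [PySem.List.pyRange_one_eq_nil (by omega)]
    simp only [List.foldl_nil, List.map_nil]
    have hemp : PySem.List.sorted ([] : List Int) (fun x => x) false = [] := rfl
    rw [hemp]
    rw [fillTwoPointers, if_neg (by norm_num)]
    simp
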